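-- pv_equiv track=rewrite | github.com/codingpiratesdiku/codingpiratesdiku | python-wordle-pygame/main.py | history_to_info
-- ===== SOURCE A (Python) =====
-- def history_to_info(guesses, clicks):
--     not_exists = []
--     nonmatch = []
--     match = []
--     for guess, clicks in zip(guesses, clicks):
--         for i, (letter, click) in enumerate(zip(guess, clicks)):
--             if click == 0:
--                 not_exists.append(letter)
--             if click == 1:
--                 nonmatch.append((i, letter))
--             if click == 2:
--                 match.append((i, letter))
--
--     # Remove from not_exists if letter is in match or nonmatch
--     for _, letter in nonmatch + match:
--         if letter in not_exists:
--             not_exists.remove(letter)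
--
--     return not_exists, nonmatch, match
-- ===== SOURCE B (Python) =====
-- def history_to_info(guesses, clicks):
--     # Flatten once, split by click value, then cancel not-exists letters
--     # against a counting budget instead of repeated list.remove scans.
--     cells = [(i, letter, click)
--              for guess, cl in zip(guesses, clicks)
--              for i, (letter, click) in enumerate(zip(guess, cl))]
--     not0 = [l for _, l, c in cells if c == 0]
--     nonmatch = [(i, l) for i, l, c in cells if c == 1]
--     match = [(i, l) for i, l, c in cells if c == 2]
--     budget = {}
--     for _, l in nonmatch + match:
--         budget[l] = budget.get(l, 0) + 1
--     not_exists = []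
--     for l in not0:
--         k = budget.get(l, 0)
--         if k > 0:
--             budget[l] = k - 1
--         else:
--             not_exists.append(l)
--     return not_exists, nonmatch, match
-- ===== Notes on version B (the rewrite author's own statement) =====
-- stated objective: alternative
-- what changed: Replaces the 'letter in not_exists / not_exists.remove(letter)' cleanup pass with a per-letter removal budget kept in a dict and one filtered pass over the click-0 letters, and builds the three lists by flattening the guess/click grid once and filtering it, instead of one accumulating nested loop.
import Mathlib
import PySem

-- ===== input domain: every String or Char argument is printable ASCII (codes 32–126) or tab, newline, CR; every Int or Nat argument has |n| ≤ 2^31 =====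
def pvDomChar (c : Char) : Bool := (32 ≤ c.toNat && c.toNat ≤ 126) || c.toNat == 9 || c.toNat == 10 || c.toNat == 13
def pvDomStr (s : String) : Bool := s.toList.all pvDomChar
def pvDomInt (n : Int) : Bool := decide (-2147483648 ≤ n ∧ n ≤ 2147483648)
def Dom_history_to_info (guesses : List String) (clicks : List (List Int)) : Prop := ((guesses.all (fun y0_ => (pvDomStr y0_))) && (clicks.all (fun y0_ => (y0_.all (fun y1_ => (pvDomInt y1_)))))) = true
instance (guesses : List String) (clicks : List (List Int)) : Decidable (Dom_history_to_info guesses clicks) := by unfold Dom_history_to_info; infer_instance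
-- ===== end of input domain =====

-- B replaces A's "letter in not_exists / not_exists.remove(letter)" cleanup pass by a
-- per-letter removal-budget dict and builds the three lists by flatten+filter (objective: alternative).

-- ===== PORT A =====
-- A-side helper: the body of A's inner classification loop (three independent ifs)
def pvStep3 (s : List String × List (Int × String) × List (Int × String)) (p : Int × Char × Int) :
    List String × List (Int × String) × List (Int × String) :=
  let s := if p.2.2 == 0 then (s.1 ++ [String.ofList [p.2.1]], s.2.1, s.2.2) else s
  let s := if p.2.2 == 1 then (s.1, s.2.1 ++ [(p.1, String.ofList [p.2.1])], s.2.2) else s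
  if p.2.2 == 2 then (s.1, s.2.1, s.2.2 ++ [(p.1, String.ofList [p.2.1])]) else s

-- A-side helper: the body of A's removal loop ("if letter in not_exists: not_exists.remove(letter)")
def pvAStep (ne : List String) (l : String) : List String :=
  if ne.contains l then (PySem.List.remove? ne l).getD ne else ne

def history_to_info (guesses : List String) (clicks : List (List Int)) : List String × (List (Int × String)) × (List (Int × String)) :=
  let s := (guesses.zip clicks).foldl (fun s gc =>
      (PySem.List.enumerate (gc.1.toList.zip gc.2) 0).foldl pvStep3 s)
    (([] : List String), ([] : List (Int × String)), ([] : List (Int × String)))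
  let ne := (s.2.1 ++ s.2.2).foldl (fun ne q => pvAStep ne q.2) s.1
  (ne, s.2.1, s.2.2)

-- ===== PORT B =====
-- B-side helper: the flattened (index, letter, click) cells
def pvCells (guesses : List String) (clicks : List (List Int)) : List (Int × Char × Int) :=
  (guesses.zip clicks).flatMap (fun gc => PySem.List.enumerate (gc.1.toList.zip gc.2) 0)

-- B-side helper: the body of B's budget-filter loop
def pvBStep (s : PySem.Dict String Int × List String) (l : String) : PySem.Dict String Int × List String :=
  let k := s.1.getD l 0
  if k > 0 then (s.1.insert l (k - 1), s.2) else (s.1, s.2 ++ [l])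

def history_to_info_alt (guesses : List String) (clicks : List (List Int)) : List String × (List (Int × String)) × (List (Int × String)) :=
  let cells := pvCells guesses clicks
  let not0 := (cells.filter (fun p => p.2.2 == 0)).map (fun p => String.ofList [p.2.1])
  let nm := (cells.filter (fun p => p.2.2 == 1)).map (fun p => (p.1, String.ofList [p.2.1]))
  let mt := (cells.filter (fun p => p.2.2 == 2)).map (fun p => (p.1, String.ofList [p.2.1]))
  let budget := (nm ++ mt).foldl (fun d q => d.insert q.2 (d.getD q.2 0 + 1)) (PySem.Dict.empty : PySem.Dict String Int)
  let r := not0.foldl pvBStep (budget, ([] : List String))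
  (r.2, nm, mt)

-- ===== PRECONDITION & SPEC =====
def Spec_history_to_info (guesses : List String) (clicks : List (List Int)) (out : List String × (List (Int × String)) × (List (Int × String))) : Prop := out = history_to_info_alt guesses clicks
instance (guesses : List String) (clicks : List (List Int)) (out : List String × (List (Int × String)) × (List (Int × String))) : Decidable (Spec_history_to_info guesses clicks out) := by unfold Spec_history_to_info; infer_instance

-- ===== CLAIM (what is proved, stated in full; the proofs are below) =====
def Claim_equal_history_to_info : Prop := ∀ (guesses : List String) (clicks : List (List Int)), Dom_history_to_info guesses clicks → Spec_history_to_info guesses clicks (history_to_info guesses clicks)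

-- ===== LEMMAS AND PROOFS =====

-- the residue of not_exists after removing, per letter x, its first (c x) occurrences
def pvSkel : List String → (String → Nat) → List String
  | [], _ => []
  | x :: xs, c => if 0 < c x then pvSkel xs (fun y => if y = x then c x - 1 else c y) else x :: pvSkel xs c

theorem pvSkel_zero (ne : List String) : pvSkel ne (fun _ => 0) = ne := by
  induction ne with
  | nil => rfl
  | cons x xs ih => simp [pvSkel, ih]

theorem pvAStep_eq (ne : List String) (l : String) :
    pvAStep ne l = if l ∈ ne then ne.erase l else ne := by
  by_cases h : l ∈ ne
  · simp [pvAStep, h, PySem.List.remove?_eq_some_erase ne l h]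
  · simp [pvAStep, h]

theorem pvSkel_inc (ne : List String) : ∀ (c : String → Nat) (l : String),
    pvSkel ne (fun y => if y = l then c y + 1 else c y) = pvSkel (pvAStep ne l) c := by
  induction ne with
  | nil => intro c l; simp [pvAStep, pvSkel]
  | cons x xs ih =>
    intro c l
    rw [pvAStep_eq]
    by_cases hxl : x = l
    · subst hxl
      have hg : (fun y => if y = x then c x else if y = x then c y + 1 else c y) = c := by
        funext y; by_cases hy : y = x <;> simp [hy]
      simp [pvSkel, hg]
    · have hlx : ¬ l = x := fun h => hxl h.symm
      have hne : (x == l) = false := by simp [hxl]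
      have hmem : l ∈ x :: xs ↔ l ∈ xs := by simp [List.mem_cons, hlx]
      have herase : (if l ∈ x :: xs then (x :: xs).erase l else x :: xs)
          = x :: (if l ∈ xs then xs.erase l else xs) := by
        by_cases hm : l ∈ xs
        · simp [hmem, hm, List.erase_cons_tail, hne]
        · simp [hmem, hm]
      rw [herase, ← pvAStep_eq]
      have hcx : (if (x : String) = l then c x + 1 else c x) = c x := by simp [hxl]
      by_cases hc : 0 < c x
      · have hf : (fun y => if y = x then c x - 1 else if y = l then c y + 1 else c y)
            = (fun y => if y = l then (if y = x then c x - 1 else c y) + 1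
                else (if y = x then c x - 1 else c y)) := by
          funext y
          by_cases hyx : y = x
          · subst hyx; simp [hxl]
          · by_cases hyl : y = l <;> simp [hyx, hyl, hlx]
        simp only [pvSkel, hcx, if_pos hc]
        rw [hf, ih]
      · simp only [pvSkel, hcx, if_neg hc, ih c l]

theorem pvFoldA_eq_skel (rem : List String) : ∀ (ne : List String),
    rem.foldl pvAStep ne = pvSkel ne (fun x => List.count x rem) := by
  induction rem with
  | nil => intro ne; simp [pvSkel_zero]
  | cons l rem ih =>
    intro ne
    have hc : (fun x => List.count x (l :: rem))
        = (fun x => if x = l then List.count x rem + 1 else List.count x rem) := by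
      funext x
      rw [List.count_cons]
      by_cases hx : x = l
      · simp [hx]
      · have hlx : (l == x) = false := beq_eq_false_iff_ne.mpr (fun h => hx h.symm)
        simp [hx, hlx]
    rw [List.foldl_cons, ih (pvAStep ne l), hc, pvSkel_inc]

theorem pvFoldB_eq_skel (ne : List String) : ∀ (d : PySem.Dict String Int) (acc : List String),
    (ne.foldl pvBStep (d, acc)).2 = acc ++ pvSkel ne (fun x => (d.getD x 0).toNat) := by
  induction ne with
  | nil => intro d acc; simp [pvSkel]
  | cons x xs ih =>
    intro d acc
    rw [List.foldl_cons]
    by_cases hk : d.getD x 0 > 0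
    · have hstep : pvBStep (d, acc) x = (d.insert x (d.getD x 0 - 1), acc) := by
        simp [pvBStep, hk]
      have hpos : 0 < (d.getD x 0).toNat := by omega
      have hf : (fun y => ((d.insert x (d.getD x 0 - 1)).getD y 0).toNat)
          = (fun y => if y = x then (d.getD x 0).toNat - 1 else (d.getD y 0).toNat) := by
        funext y
        rw [PySem.Dict.getD_insert]
        by_cases hy : y = x
        · simp [hy]
        · simp [hy]
      rw [hstep, ih, hf]
      simp only [pvSkel, if_pos hpos]
    · have hstep : pvBStep (d, acc) x = (d, acc ++ [x]) := by
        simp [pvBStep, hk]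
      have hz : ¬ 0 < (d.getD x 0).toNat := by omega
      rw [hstep, ih]
      simp only [pvSkel, if_neg hz, List.append_assoc, List.singleton_append]

theorem pvPhase1 (cells : List (Int × Char × Int)) :
    ∀ (a : List String) (b c : List (Int × String)),
    cells.foldl pvStep3 (a, b, c) =
      (a ++ (cells.filter (fun p => p.2.2 == 0)).map (fun p => String.ofList [p.2.1]),
       b ++ (cells.filter (fun p => p.2.2 == 1)).map (fun p => (p.1, String.ofList [p.2.1])),
       c ++ (cells.filter (fun p => p.2.2 == 2)).map (fun p => (p.1, String.ofList [p.2.1]))) := by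
  induction cells with
  | nil => intro a b c; simp
  | cons p ps ih =>
    intro a b c
    rw [List.foldl_cons]
    by_cases h0 : p.2.2 = 0
    · have : pvStep3 (a, b, c) p = (a ++ [String.ofList [p.2.1]], b, c) := by
        simp [pvStep3, h0]
      rw [this, ih]
      simp [List.filter_cons, h0, List.append_assoc]
    · by_cases h1 : p.2.2 = 1
      · have : pvStep3 (a, b, c) p = (a, b ++ [(p.1, String.ofList [p.2.1])], c) := by
          simp [pvStep3, h0, h1]
        rw [this, ih]
        simp [List.filter_cons, h0, h1, List.append_assoc]
      · by_cases h2 : p.2.2 = 2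
        · have : pvStep3 (a, b, c) p = (a, b, c ++ [(p.1, String.ofList [p.2.1])]) := by
            simp [pvStep3, h0, h1, h2]
          rw [this, ih]
          simp [List.filter_cons, h0, h1, h2, List.append_assoc]
        · have : pvStep3 (a, b, c) p = (a, b, c) := by
            simp [pvStep3, h0, h1, h2]
          rw [this, ih]
          simp [List.filter_cons, h0, h1, h2]

-- ===== VERDICT (by name: the statement is the Claim_ definition above) =====
theorem history_to_info_spec : Claim_equal_history_to_info := by
  intro guesses clicks _
  unfold Spec_history_to_info history_to_info history_to_info_alt
  have hnest : (guesses.zip clicks).foldl (fun s gc =>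
        (PySem.List.enumerate (gc.1.toList.zip gc.2) 0).foldl pvStep3 s)
      (([] : List String), ([] : List (Int × String)), ([] : List (Int × String)))
      = (pvCells guesses clicks).foldl pvStep3 ([], [], []) := by
    rw [pvCells, List.foldl_flatMap]
  rw [hnest, pvPhase1]
  simp only [List.nil_append]
  set cells := pvCells guesses clicks with hcells
  set not0 := (cells.filter (fun p => p.2.2 == 0)).map (fun p => String.ofList [p.2.1]) with hnot0
  set nm := (cells.filter (fun p => p.2.2 == 1)).map (fun p => (p.1, String.ofList [p.2.1])) with hnm
  set mt := (cells.filter (fun p => p.2.2 == 2)).map (fun p => (p.1, String.ofList [p.2.1])) with hmt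
  have hA : (nm ++ mt).foldl (fun ne q => pvAStep ne q.2) not0
      = pvSkel not0 (fun x => List.count x ((nm ++ mt).map (·.2))) := by
    rw [← List.foldl_map (f := fun (q : Int × String) => q.2) (g := pvAStep), pvFoldA_eq_skel]
  have hbudget : ∀ x, ((((nm ++ mt).foldl (fun d q => d.insert q.2 (d.getD q.2 0 + 1))
        (PySem.Dict.empty : PySem.Dict String Int))).getD x 0).toNat
      = List.count x ((nm ++ mt).map (·.2)) := by
    intro x
    rw [← List.foldl_map (f := fun (q : Int × String) => q.2)
        (g := fun (d : PySem.Dict String Int) l => d.insert l (d.getD l 0 + 1)),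
      PySem.Dict.getD_foldl_insert_add_one]
    rw [PySem.Dict.getD_empty]
    omega
  have hB : (not0.foldl pvBStep
        ((nm ++ mt).foldl (fun d q => d.insert q.2 (d.getD q.2 0 + 1))
          (PySem.Dict.empty : PySem.Dict String Int), ([] : List String))).2
      = pvSkel not0 (fun x => List.count x ((nm ++ mt).map (·.2))) := by
    rw [pvFoldB_eq_skel]
    simp only [List.nil_append]
    congr 1
    funext x
    exact hbudget x
  simp only [hA, ← hB]
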